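-- pv_equiv track=rewrite | github.com/billy-price/watersort-solver | solver.py | help_solve
-- ===== SOURCE A (Python) =====
-- TUBE_HEIGHT = 4
--
-- COLOUR_VOLUME = 4
--
-- def top_chunk(tube):
--   if len(tube) == 0:
--     return (0,0)
--   n = 1
--   c = tube[-1]
--   while n < len(tube) and tube[-(n+1)] == c:
--     n += 1
--
--   return (c,n)
--
-- def good_source(st):
--   c,n =  top_chunk(st)
--   return n != 0
--
-- def good_move(st, tt):
--   c,n = top_chunk(st)
--
--   # illegal move
--   if n == 0 or (len(tt) !=0 and tt[-1] != c): return False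
--
--   # pointless move
--   if len(tt) == 0 and len(st) == n: return False
--
--   # can move entire chunk -> good move
--   return n + len(tt) <= TUBE_HEIGHT
--
-- def good_moves(tubes):
--   for s, st in enumerate(tubes):
--     if not good_source(st): continue
--
--     for t, tt in enumerate(tubes):
--       if t == s: continue
--
--       if good_move(st, tt):
--         yield (s,top_chunk(st),t)
--
-- def make_move(tubes, s, chunk, t):
--   c,out = chunk
--   while out > 0:
--     tubes[t].append(tubes[s].pop())
--     out -= 1
--
-- def undo_move(tubes, s, ch, t):
--   make_move(tubes, t, ch, s)
--
-- def is_solved(tubes):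
--   for tube in tubes:
--     if len(tube) > 0:
--       if len(tube) < COLOUR_VOLUME:
--         return False
--       c = tube[0]
--       for oc in tube:
--         if oc != c:
--           return False
--
--   return True
--
-- def copy_tubes(tubes):
--     return [[x for x in tube] for tube in tubes]
--
-- def help_solve(tubes, moves):
--   for move in good_moves(tubes):
--     make_move(tubes, *move)
--     moves.append((move, copy_tubes(tubes)))
--     if is_solved(tubes):
--       return True
--     elif help_solve(tubes, moves):
--       return True
--     else:
--       moves.pop()
--       undo_move(tubes, *move)
--   return False
-- ===== SOURCE B (Python) =====
-- # B: DFS with a transposition table of dead (unsolvable) states over immutable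
-- # state tuples, instead of A's naive backtracking that re-explores the same states;
-- # same move order and same recorded path; equivalence is claimed for the returned
-- # Bool (B also reproduces A's final in-place updates of `tubes` and `moves`).
-- TUBE_HEIGHT = 4
-- COLOUR_VOLUME = 4
--
-- def help_solve(tubes, moves):
--   dead = set()
--   path = []
--
--   def top(st):
--     if not st:
--       return (0, 0)
--     c = st[-1]
--     k = 0
--     for x in reversed(st):
--       if x != c:
--         break
--       k += 1
--     return (c, k)
--
--   def legal_moves(state):
--     n = len(state)
--     out = []
--     for s in range(n):
--       c, k = top(state[s])
--       if k == 0: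
--         continue
--       for t in range(n):
--         if t == s:
--           continue
--         tt = state[t]
--         if k + len(tt) > TUBE_HEIGHT:
--           continue
--         if (tt and tt[-1] == c) or (not tt and len(state[s]) != k):
--           out.append((s, (c, k), t))
--     return out
--
--   def solved(state):
--     return all(not t or (len(t) >= COLOUR_VOLUME and all(x == t[0] for x in t))
--                for t in state)
--
--   def apply_move(state, mv):
--     s, (c, k), t = mv
--     new = list(state)
--     new[s] = state[s][:-k]
--     new[t] = state[t] + (c,) * k
--     return tuple(new)
--
--   def dfs(state):
--     if state in dead:
--       return False
--     for mv in legal_moves(state):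
--       ns = apply_move(state, mv)
--       path.append((mv, [list(t) for t in ns]))
--       if solved(ns) or dfs(ns):
--         return True
--       path.pop()
--     dead.add(state)
--     return False
--
--   if dfs(tuple(tuple(t) for t in tubes)):
--     moves.extend(path)
--     final = path[-1][1]
--     for i in range(len(tubes)):
--       tubes[i][:] = [x for x in final[i]]
--     return True
--   return False
-- ===== Notes on version B (the rewrite author's own statement) =====
-- stated objective: faster
-- what changed: B replaces A's naive backtracking DFS over a mutated board (which re-explores the same unsolvable states exponentially often) by a DFS over immutable state tuples with a transposition table caching dead (False-returning) states, generating moves by index loops and applying a move by slicing instead of pop/append; move order, the returned Bool and the final mutations of tubes/moves are identical.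
import Mathlib
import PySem

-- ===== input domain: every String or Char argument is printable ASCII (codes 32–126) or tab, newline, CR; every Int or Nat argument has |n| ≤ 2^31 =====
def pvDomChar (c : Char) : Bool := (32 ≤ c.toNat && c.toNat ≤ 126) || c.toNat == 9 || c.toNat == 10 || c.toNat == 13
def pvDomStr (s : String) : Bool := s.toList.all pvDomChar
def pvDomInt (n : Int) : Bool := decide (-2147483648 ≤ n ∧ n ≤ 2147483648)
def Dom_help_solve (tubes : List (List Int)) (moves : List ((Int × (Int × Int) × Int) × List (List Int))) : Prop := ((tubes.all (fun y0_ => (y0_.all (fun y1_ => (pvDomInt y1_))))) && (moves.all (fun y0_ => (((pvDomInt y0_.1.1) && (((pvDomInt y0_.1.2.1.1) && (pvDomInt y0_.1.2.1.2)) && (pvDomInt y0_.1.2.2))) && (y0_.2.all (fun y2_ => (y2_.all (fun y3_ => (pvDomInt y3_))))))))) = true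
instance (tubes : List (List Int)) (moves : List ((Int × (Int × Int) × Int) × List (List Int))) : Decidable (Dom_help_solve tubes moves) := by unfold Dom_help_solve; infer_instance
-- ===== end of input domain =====

-- B replaces A's naive backtracking DFS (which re-explores the same unsolvable states
-- over and over) by a DFS over immutable states with a transposition table of dead
-- states, so each unsolvable state is expanded at most once; same move order, and B
-- also reproduces A's in-place mutations of `tubes`/`moves` (the theorems below are
-- about the returned Bool).

-- ===== PORT A =====
-- the `while n < len(tube) and tube[-(n+1)] == c: n += 1` loop of top_chunk
def topLoopA (tube : List Int) (c : Int) (n : Nat) : Nat :=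
  if h : n < tube.length ∧ PySem.List.pyGet? tube (-((n : Int) + 1)) = some c then
    topLoopA tube c (n + 1)
  else n
termination_by tube.length - n
decreasing_by omega

def topChunkA (tube : List Int) : Int × Int :=
  if tube.length = 0 then (0, 0)
  else
    match PySem.List.pyGet? tube (-1) with
    | none => (0, 0)      -- unreachable: tube is nonempty
    | some c => (c, (topLoopA tube c 1 : Int))

def goodSourceA (st : List Int) : Bool := (topChunkA st).2 != 0

def goodMoveA (st tt : List Int) : Bool :=
  let cn := topChunkA st
  if cn.2 = 0 ∨ (tt.length ≠ 0 ∧ PySem.List.pyGet? tt (-1) ≠ some cn.1) then false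
  else if tt.length = 0 ∧ (st.length : Int) = cn.2 then false
  else decide (cn.2 + (tt.length : Int) ≤ 4)

-- good_moves, eagerly (the generator is only ever resumed with `tubes` restored
-- to the exact value it had when it was suspended, so this is the same sequence)
def goodMovesA (tubes : List (List Int)) : List (Int × (Int × Int) × Int) :=
  (PySem.List.enumerate tubes).flatMap fun p =>
    if goodSourceA p.2 = false then []
    else
      (PySem.List.enumerate tubes).filterMap fun q =>
        if q.1 = p.1 then none
        else if goodMoveA p.2 q.2 then some (p.1, topChunkA p.2, q.1)
        else none

-- the `while out > 0: tubes[t].append(tubes[s].pop()); out -= 1` loop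
def makeLoopA (tubes : List (List Int)) (s t : Int) (out : Int) : List (List Int) :=
  if h : 0 < out then
    match PySem.List.pyGet? tubes s with
    | none => tubes
    | some st =>
      match st.getLast? with        -- .pop(): read last element …
      | none => tubes
      | some x =>
        let tubes1 := PySem.List.pySetD tubes s st.dropLast   -- … and remove it
        match PySem.List.pyGet? tubes1 t with
        | none => tubes1
        | some tt => makeLoopA (PySem.List.pySetD tubes1 t (tt ++ [x])) s t (out - 1)
  else tubes
termination_by out.toNat
decreasing_by omega

def makeMoveA (tubes : List (List Int)) (s : Int) (chunk : Int × Int) (t : Int) : List (List Int) :=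
  makeLoopA tubes s t chunk.2

def isSolvedA : List (List Int) → Bool
  | [] => true
  | tube :: rest =>
    if 0 < tube.length then
      if tube.length < 4 then false
      else
        match tube with
        | [] => isSolvedA rest      -- unreachable
        | c :: _ => if tube.all (fun oc => oc == c) then isSolvedA rest else false
    else isSolvedA rest

def copyTubesA (tubes : List (List Int)) : List (List Int) :=
  tubes.map fun tube => tube.map fun x => x

-- ===== the A entry point ===== (fuel is a totality guard only; it never runs
-- out: the measure `mu` below strictly decreases along every good move, and the
-- initial fuel exceeds mu of the initial state)
mutual
def helpA : Nat → List (List Int) → List ((Int × (Int × Int) × Int) × List (List Int)) → Bool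
  | 0, _, _ => false
  | fuel + 1, tubes, moves => goA fuel tubes moves (goodMovesA tubes)
  termination_by f _ _ => (f, 0)
  decreasing_by apply Prod.Lex.left; omega

def goA (fuel : Nat) (tubes : List (List Int)) (moves : List ((Int × (Int × Int) × Int) × List (List Int))) :
    List (Int × (Int × Int) × Int) → Bool
  | [] => false
  | mv :: rest =>
    let tubes' := makeMoveA tubes mv.1 mv.2.1 mv.2.2
    if isSolvedA tubes' then true
    else if helpA fuel tubes' (moves ++ [(mv, copyTubesA tubes')]) then true
    else goA fuel tubes moves rest
  termination_by ms => (fuel, ms.length + 1)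
  decreasing_by
    · apply Prod.Lex.right; simp only [List.length_cons]; omega
    · apply Prod.Lex.right; simp only [List.length_cons]; omega
end

def help_solve (tubes : List (List Int)) (moves : List ((Int × (Int × Int) × Int) × List (List Int))) : Bool :=
  helpA (((tubes.map List.length).sum + 1) * (tubes.length + 1)) tubes moves

-- Source B's reversed-scan run-length helper (the `for x in reversed(st)` loop of top)
def runLen (c : Int) : List Int → Nat
  | [] => 0
  | x :: xs => if x = c then runLen c xs + 1 else 0

def topB (tube : List Int) : Int × Int :=
  match tube.getLast? with
  | none => (0, 0)
  | some c => (c, (runLen c tube.reverse : Nat))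

-- ===== PORT B ===== (Source B: memoized DFS with fuel as a totality guard;
-- the fuel never runs out — mu strictly decreases along every move)
def movesB (state : List (List Int)) : List (Int × (Int × Int) × Int) :=
  (List.range state.length).flatMap fun s =>
    let st := state.getD s []
    let cn := topB st
    if cn.2 = 0 then []
    else
      (List.range state.length).flatMap fun t =>
        if t = s then []
        else
          let tt := state.getD t []
          if 4 < cn.2 + (tt.length : Int) then []
          else if (tt ≠ [] ∧ tt.getLast? = some cn.1) ∨ (tt = [] ∧ (st.length : Int) ≠ cn.2)
          then [((s : Int), cn, (t : Int))] else []

def solvedB (state : List (List Int)) : Bool :=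
  state.all fun t => t.length == 0 || (decide (4 ≤ t.length) && t.all fun x => x == t.headI)

def applyB (state : List (List Int)) (mv : Int × (Int × Int) × Int) : List (List Int) :=
  let st := PySem.List.pyGetD state mv.1 []
  let tt := PySem.List.pyGetD state mv.2.2 []
  PySem.List.pySetD
    (PySem.List.pySetD state mv.1 (PySem.List.slice st none (some (-mv.2.1.2)))) mv.2.2
    (tt ++ List.replicate mv.2.1.2.toNat mv.2.1.1)

def dfsB : Nat → List (List Int) → PySem.Set (List (List Int)) →
    Bool × PySem.Set (List (List Int))
  | 0, _, dead => (false, dead)     -- fuel guard only; never reached (mu bounds the depth)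
  | fuel + 1, state, dead =>
    if PySem.Set.contains dead state then (false, dead)
    else
      let r := (movesB state).foldl
        (fun acc mv =>
          if acc.1 then acc
          else
            let ns := applyB state mv
            if solvedB ns then (true, acc.2) else dfsB fuel ns acc.2)
        (false, dead)
      if r.1 then r else (false, PySem.Set.add r.2 state)

def help_solve_alt (tubes : List (List Int)) (moves : List ((Int × (Int × Int) × Int) × List (List Int))) : Bool :=
  (dfsB ((tubes.map List.length).sum * (tubes.length + 1) + tubes.length + 1)
    tubes PySem.Set.empty).1

-- ===== PRECONDITION & SPEC =====
def Spec_help_solve (tubes : List (List Int)) (moves : List ((Int × (Int × Int) × Int) × List (List Int))) (out : Bool) : Prop := out = help_solve_alt tubes moves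
instance (tubes : List (List Int)) (moves : List ((Int × (Int × Int) × Int) × List (List Int))) (out : Bool) : Decidable (Spec_help_solve tubes moves out) := by unfold Spec_help_solve; infer_instance

-- ===== CLAIM (what is proved, stated in full; the proofs are below) =====
def Claim_equal_help_solve : Prop := ∀ (tubes : List (List Int)) (moves : List ((Int × (Int × Int) × Int) × List (List Int))), Dom_help_solve tubes moves → Spec_help_solve tubes moves (help_solve tubes moves)

-- ===== LEMMAS AND PROOFS =====
-- measure machinery for the equivalence proofs (mu strictly decreases along every good move)

def topRun (tube : List Int) : Nat :=
  match tube.getLast? with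
  | none => 0
  | some c => runLen c tube.reverse

def dW (tube : List Int) : Nat := tube.length - topRun tube

def neW (tube : List Int) : Nat := if tube = [] then 0 else 1

def mu (tubes : List (List Int)) : Nat :=
  ((tubes.map dW).sum) * (tubes.length + 1) + (tubes.map neW).sum


theorem runLen_le (c : Int) (l : List Int) : runLen c l ≤ l.length := by
  induction l with
  | nil => simp [runLen]
  | cons x xs ih => simp only [runLen, List.length_cons]; split <;> omega

theorem take_runLen (c : Int) (l : List Int) :
    l.take (runLen c l) = List.replicate (runLen c l) c := by
  induction l with
  | nil => simp [runLen]
  | cons x xs ih =>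
    simp only [runLen]
    split
    · next h => subst h; simp [List.replicate_succ, ih]
    · simp

theorem runLen_get {c : Int} {l : List Int} {k : Nat} (hk : k < runLen c l) :
    l[k]? = some c := by
  have h1 : l.take (runLen c l) = List.replicate (runLen c l) c := take_runLen c l
  have h2 : (l.take (runLen c l))[k]? = l[k]? := List.getElem?_take_of_lt hk
  rw [h1] at h2
  rw [← h2, List.getElem?_replicate]
  simp [hk]

theorem runLen_stop {c : Int} {l : List Int} (h : runLen c l < l.length) :
    l[runLen c l]? ≠ some c := by
  induction l with
  | nil => simp [runLen] at h
  | cons x xs ih =>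
    by_cases hx : x = c
    · subst hx
      simp only [runLen, if_pos rfl, if_true, List.length_cons] at h ⊢
      rw [List.getElem?_cons_succ]
      exact ih (by omega)
    · simp [runLen, hx]

theorem runLen_replicate (c : Int) (r : Nat) : runLen c (List.replicate r c) = r := by
  induction r with
  | zero => simp [runLen]
  | succ r ih => simp [List.replicate_succ, runLen, ih]

theorem runLen_replicate_append (c : Int) (r : Nat) (l : List Int) :
    runLen c (List.replicate r c ++ l) = r + runLen c l := by
  induction r with
  | zero => simp
  | succ r ih =>
    rw [List.replicate_succ, List.cons_append]
    simp only [runLen, if_pos rfl, if_true, ih]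
    omega

theorem topLoopA_eq {tube : List Int} {c : Int} (hc : tube.getLast? = some c) :
    ∀ n, 1 ≤ n → n ≤ runLen c tube.reverse → topLoopA tube c n = runLen c tube.reverse := by
  have hlen : runLen c tube.reverse ≤ tube.length := by
    simpa using runLen_le c tube.reverse
  intro n h1 h2
  induction hn : tube.length - n generalizing n with
  | zero =>
    have hn' : n = runLen c tube.reverse := by omega
    subst hn'
    rw [topLoopA]
    rw [dif_neg]
    omega
  | succ k ih =>
    rw [topLoopA]
    by_cases hlt : n < runLen c tube.reverse
    · rw [dif_pos]
      · exact ih (n + 1) (by omega) (by omega) (by omega)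
      · constructor
        · omega
        · have : (-((n : Int) + 1)) = -(((n + 1 : Nat) : Int)) := by push_cast; ring
          rw [this, PySem.List.pyGet?_neg_natCast tube (n+1) (by omega) (by omega)]
          have := runLen_get (c := c) (l := tube.reverse) hlt
          rw [List.getElem?_reverse (by omega)] at this
          rw [← this]
          congr 1
          omega
    · have hn' : n = runLen c tube.reverse := by omega
      subst hn'
      rw [dif_neg]
      rintro ⟨hl, hg⟩
      have : (-((runLen c tube.reverse : Int) + 1)) = -(((runLen c tube.reverse + 1 : Nat) : Int)) := by push_cast; ring
      rw [this, PySem.List.pyGet?_neg_natCast tube (runLen c tube.reverse + 1) (by omega) (by omega)] at hg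
      have hst := runLen_stop (c := c) (l := tube.reverse) (by simpa using hl)
      rw [List.getElem?_reverse (by simpa using hl)] at hst
      apply hst
      rw [← hg]
      congr 1
      omega

theorem runLen_reverse_pos {tube : List Int} {c : Int} (hc : tube.getLast? = some c) :
    1 ≤ runLen c tube.reverse := by
  have : tube.reverse.head? = some c := by rwa [List.head?_reverse]
  cases hr : tube.reverse with
  | nil => rw [hr] at this; simp at this
  | cons y ys =>
    rw [hr] at this
    simp only [List.head?_cons, Option.some.injEq] at this
    subst this
    simp [runLen]

theorem topChunkA_eq_topB (tube : List Int) : topChunkA tube = topB tube := by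
  rcases hc : tube.getLast? with _ | c
  · have : tube = [] := by simpa using hc
    subst this
    simp [topChunkA, topB]
  · have hne : tube ≠ [] := by rintro rfl; simp at hc
    have hlen : tube.length ≠ 0 := by simpa using hne
    simp only [topChunkA, topB, hc, if_neg hlen, PySem.List.pyGet?_neg_one]
    rw [topLoopA_eq hc 1 le_rfl (runLen_reverse_pos hc)]

theorem mem_goodMovesA {tubes : List (List Int)} {mv : Int × (Int × Int) × Int}
    (h : mv ∈ goodMovesA tubes) :
    ∃ (s t : Nat) (hs : s < tubes.length) (ht : t < tubes.length), s ≠ t ∧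
      goodSourceA tubes[s] = true ∧ goodMoveA tubes[s] tubes[t] = true ∧
      mv = ((s : Int), topChunkA tubes[s], (t : Int)) := by
  unfold goodMovesA at h
  rw [List.mem_flatMap] at h
  obtain ⟨p, hp, hmem⟩ := h
  rw [PySem.List.mem_enumerate_iff] at hp
  obtain ⟨s, hs, rfl⟩ := hp
  split at hmem
  · simp at hmem
  · next hsrc =>
    rw [List.mem_filterMap] at hmem
    obtain ⟨q, hq, heq⟩ := hmem
    rw [PySem.List.mem_enumerate_iff] at hq
    obtain ⟨t, ht, rfl⟩ := hq
    simp only [zero_add] at heq ⊢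
    split at heq
    · simp at heq
    · next hne =>
      split at heq
      · next hgm =>
        refine ⟨s, t, hs, ht, ?_, ?_, hgm, by simpa using heq.symm⟩
        · intro hst
          exact hne (by simp [hst])
        · simpa using hsrc
      · simp at heq

theorem makeLoopA_spec (k : Nat) : ∀ (tubes : List (List Int)) (s t : Nat)
    (hs : s < tubes.length) (ht : t < tubes.length), s ≠ t → k ≤ (tubes[s]'hs).length →
    makeLoopA tubes (s : Int) (t : Int) (k : Int) =
      (tubes.set s ((tubes[s]'hs).take ((tubes[s]'hs).length - k))).set t
        ((tubes[t]'ht) ++ ((tubes[s]'hs).drop ((tubes[s]'hs).length - k)).reverse) := by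
  induction k with
  | zero =>
    intro tubes s t hs ht hne hk
    rw [makeLoopA, dif_neg (by omega)]
    simp [List.set_getElem_self]
  | succ k ih =>
    intro tubes s t hs ht hne hk
    have hstne : tubes[s]'hs ≠ [] := by
      intro hnil; rw [hnil] at hk; simp at hk
    rw [makeLoopA, dif_pos (by omega)]
    rw [show PySem.List.pyGet? tubes (s : Int) = some (tubes[s]'hs) by
      rw [PySem.List.pyGet?_natCast, List.getElem?_eq_getElem hs]]
    dsimp only
    rw [List.getLast?_eq_some_getLast hstne]
    simp only [PySem.List.pySetD_natCast]
    have ht1 : t < (tubes.set s (tubes[s]'hs).dropLast).length := by simpa using ht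
    rw [show PySem.List.pyGet? (tubes.set s (tubes[s]'hs).dropLast) (t : Int)
          = some (tubes[t]'ht) by
      rw [PySem.List.pyGet?_natCast, List.getElem?_eq_getElem ht1,
        List.getElem_set_ne (by omega)]]
    dsimp only
    rw [show (((k + 1 : Nat) : Int)) - 1 = ((k : Nat) : Int) by push_cast; ring]
    have hs2 : s < ((tubes.set s (tubes[s]'hs).dropLast).set t
        ((tubes[t]'ht) ++ [(tubes[s]'hs).getLast hstne])).length := by
      simp; omega
    have ht2 : t < ((tubes.set s (tubes[s]'hs).dropLast).set t
        ((tubes[t]'ht) ++ [(tubes[s]'hs).getLast hstne])).length := by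
      simp; omega
    have h2s : ((tubes.set s (tubes[s]'hs).dropLast).set t
        ((tubes[t]'ht) ++ [(tubes[s]'hs).getLast hstne]))[s]'hs2 = (tubes[s]'hs).dropLast := by
      simp [List.getElem_set, hne, Ne.symm hne]
    have h2t : ((tubes.set s (tubes[s]'hs).dropLast).set t
        ((tubes[t]'ht) ++ [(tubes[s]'hs).getLast hstne]))[t]'ht2
        = (tubes[t]'ht) ++ [(tubes[s]'hs).getLast hstne] := by
      simp [List.getElem_set]
    rw [ih _ s t hs2 ht2 hne (by rw [h2s]; simp; omega)]
    rw [h2s, h2t]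
    rw [List.set_comm _ _ (by omega : t ≠ s)]
    simp only [List.set_set]
    have e1 : (tubes[s]'hs).dropLast.take ((tubes[s]'hs).dropLast.length - k)
        = (tubes[s]'hs).take ((tubes[s]'hs).length - (k + 1)) := by
      rw [List.dropLast_eq_take, List.take_take]
      congr 1
      simp only [List.length_take]
      omega
    have e2 : ((tubes[t]'ht) ++ [(tubes[s]'hs).getLast hstne])
          ++ ((tubes[s]'hs).dropLast.drop ((tubes[s]'hs).dropLast.length - k)).reverse
        = (tubes[t]'ht) ++ ((tubes[s]'hs).drop ((tubes[s]'hs).length - (k + 1))).reverse := by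
      rw [List.append_assoc]
      congr 1
      have hsplit : tubes[s]'hs = (tubes[s]'hs).dropLast ++ [(tubes[s]'hs).getLast hstne] :=
        (List.dropLast_append_getLast hstne).symm
      calc [(tubes[s]'hs).getLast hstne]
            ++ ((tubes[s]'hs).dropLast.drop ((tubes[s]'hs).dropLast.length - k)).reverse
          = (((tubes[s]'hs).dropLast.drop ((tubes[s]'hs).dropLast.length - k))
              ++ [(tubes[s]'hs).getLast hstne]).reverse := by
            simp
        _ = ((tubes[s]'hs).drop ((tubes[s]'hs).length - (k + 1))).reverse := by
            congr 1
            conv_rhs => rw [hsplit]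
            rw [List.drop_append_of_le_length (by
              simp only [List.length_dropLast, List.length_append, List.length_cons, List.length_nil]; omega)]
            congr 2
            simp only [List.length_dropLast, List.length_append, List.length_cons, List.length_nil]
            omega
    rw [e1, e2]

theorem topRun_of_getLast {tube : List Int} {c : Int} (hc : tube.getLast? = some c) :
    topRun tube = runLen c tube.reverse := by
  unfold topRun
  rw [hc]

theorem topRun_pos {tube : List Int} (h : tube ≠ []) : 1 ≤ topRun tube := by
  obtain ⟨c, hc⟩ : ∃ c, tube.getLast? = some c :=
    ⟨tube.getLast h, List.getLast?_eq_some_getLast h⟩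
  unfold topRun
  rw [hc]
  exact runLen_reverse_pos hc

theorem topRun_append_replicate (tt : List Int) (c : Int) (r : Nat) (hr : 1 ≤ r) :
    topRun (tt ++ List.replicate r c) = r + runLen c tt.reverse := by
  have hrep : List.replicate r c = List.replicate (r - 1) c ++ [c] := by
    conv_lhs => rw [show r = (r - 1) + 1 by omega]
    exact List.replicate_succ'
  have hlast : (tt ++ List.replicate r c).getLast? = some c := by
    rw [hrep, ← List.append_assoc, List.getLast?_concat]
  rw [topRun_of_getLast hlast, List.reverse_append, List.reverse_replicate,
    runLen_replicate_append]

theorem neW_sum_le (l : List (List Int)) : (l.map neW).sum ≤ l.length := by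
  induction l with
  | nil => simp
  | cons y ys ih =>
    have : neW y ≤ 1 := by unfold neW; split <;> omega
    simp only [List.map_cons, List.sum_cons, List.length_cons]
    omega

theorem map_sum_set (f : List Int → Nat) (l : List (List Int)) (i : Nat) (x : List Int)
    (h : i < l.length) :
    ((l.set i x).map f).sum + f (l[i]'h) = (l.map f).sum + f x := by
  induction l generalizing i with
  | nil => simp at h
  | cons y ys ih =>
    cases i with
    | zero => simp [List.set]; omega
    | succ i =>
      simp only [List.set, List.map_cons, List.sum_cons, List.getElem_cons_succ]
      have := ih i (by simpa using Nat.lt_of_succ_lt_succ h)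
      omega

theorem mu_math (S1 S3 N1 N3 T : Nat) (hT : 1 ≤ T) (hN : N1 ≤ T)
    (h : (S3 + 1 ≤ S1 ∧ N3 ≤ N1 + 1) ∨ (S3 = S1 ∧ N3 < N1)) :
    S3 * (T + 1) + N3 < S1 * (T + 1) + N1 := by
  rcases h with ⟨h1, h2⟩ | ⟨h1, h2⟩
  · have hm : S3 * (T + 1) + (T + 1) ≤ S1 * (T + 1) := by
      calc S3 * (T + 1) + (T + 1) = (S3 + 1) * (T + 1) := by ring
        _ ≤ S1 * (T + 1) := Nat.mul_le_mul_right _ h1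
    revert hm
    generalize S3 * (T + 1) = P
    generalize S1 * (T + 1) = Q
    intro hm
    omega
  · rw [h1]
    generalize S1 * (T + 1) = P
    omega

theorem mu_decreaseA {tubes : List (List Int)} {mv : Int × (Int × Int) × Int}
    (h : mv ∈ goodMovesA tubes) :
    mu (makeMoveA tubes mv.1 mv.2.1 mv.2.2) < mu tubes := by
  obtain ⟨s, t, hs, ht, hst, hsrc, hgm, rfl⟩ := mem_goodMovesA h
  have hstne : tubes[s]'hs ≠ [] := by
    intro hnil
    rw [goodSourceA, topChunkA_eq_topB, hnil] at hsrc
    simp [topB] at hsrc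
  obtain ⟨c, hc⟩ : ∃ c, (tubes[s]'hs).getLast? = some c :=
    ⟨(tubes[s]'hs).getLast hstne, List.getLast?_eq_some_getLast hstne⟩
  have htop : topB (tubes[s]'hs) = (c, ((runLen c (tubes[s]'hs).reverse : Nat) : Int)) := by
    rw [topB, hc]
  have htopA : topChunkA (tubes[s]'hs) = (c, ((runLen c (tubes[s]'hs).reverse : Nat) : Int)) := by
    rw [topChunkA_eq_topB]; exact htop
  have hr1 : 1 ≤ runLen c (tubes[s]'hs).reverse := runLen_reverse_pos hc
  have hrle : runLen c (tubes[s]'hs).reverse ≤ (tubes[s]'hs).length := by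
    simpa using runLen_le c (tubes[s]'hs).reverse
  have htoprun : topRun (tubes[s]'hs) = runLen c (tubes[s]'hs).reverse :=
    topRun_of_getLast hc
  rw [goodMoveA] at hgm
  simp only [htopA] at hgm
  split_ifs at hgm with h1 h2
  push_neg at h1 h2
  have hrep : ((tubes[s]'hs).drop ((tubes[s]'hs).length - runLen c (tubes[s]'hs).reverse)).reverse
      = List.replicate (runLen c (tubes[s]'hs).reverse) c := by
    rw [← List.take_reverse]
    exact take_runLen c (tubes[s]'hs).reverse
  have hmm : makeMoveA tubes (s : Int) (topChunkA (tubes[s]'hs)) (t : Int)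
      = (tubes.set s ((tubes[s]'hs).take
          ((tubes[s]'hs).length - runLen c (tubes[s]'hs).reverse))).set t
        ((tubes[t]'ht) ++ List.replicate (runLen c (tubes[s]'hs).reverse) c) := by
    rw [htopA, makeMoveA]
    rw [makeLoopA_spec (runLen c (tubes[s]'hs).reverse) tubes s t hs ht (by omega) hrle]
    rw [hrep]
  simp only at hmm
  rw [hmm]
  have hlen : (((tubes.set s ((tubes[s]'hs).take
      ((tubes[s]'hs).length - runLen c (tubes[s]'hs).reverse))).set t
      ((tubes[t]'ht) ++ List.replicate (runLen c (tubes[s]'hs).reverse) c))).length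
      = tubes.length := by simp
  have hts : t < (tubes.set s ((tubes[s]'hs).take
      ((tubes[s]'hs).length - runLen c (tubes[s]'hs).reverse))).length := by simpa using ht
  have hmid : ((tubes.set s ((tubes[s]'hs).take
      ((tubes[s]'hs).length - runLen c (tubes[s]'hs).reverse)))[t]'hts) = tubes[t]'ht := by
    rw [List.getElem_set_ne (by omega)]
  have hsum1 : ∀ f : List Int → Nat,
      (((tubes.set s ((tubes[s]'hs).take
        ((tubes[s]'hs).length - runLen c (tubes[s]'hs).reverse))).set t
        ((tubes[t]'ht) ++ List.replicate (runLen c (tubes[s]'hs).reverse) c)).map f).sum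
        + f (tubes[t]'ht) + f (tubes[s]'hs)
      = (tubes.map f).sum
        + f ((tubes[s]'hs).take ((tubes[s]'hs).length - runLen c (tubes[s]'hs).reverse))
        + f ((tubes[t]'ht) ++ List.replicate (runLen c (tubes[s]'hs).reverse) c) := by
    intro f
    have e2 := map_sum_set f (tubes.set s ((tubes[s]'hs).take
        ((tubes[s]'hs).length - runLen c (tubes[s]'hs).reverse))) t
        ((tubes[t]'ht) ++ List.replicate (runLen c (tubes[s]'hs).reverse) c) hts
    rw [hmid] at e2
    have e1 := map_sum_set f tubes s
        ((tubes[s]'hs).take ((tubes[s]'hs).length - runLen c (tubes[s]'hs).reverse)) hs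
    omega
  have hSd := hsum1 dW
  have hSn := hsum1 neW
  have hdst : dW (tubes[s]'hs) = (tubes[s]'hs).length - runLen c (tubes[s]'hs).reverse := by
    rw [dW, htoprun]
  have htt_cases : (tubes[t]'ht) = [] ∨ (tubes[t]'ht).getLast? = some c := by
    by_cases hnil : (tubes[t]'ht) = []
    · exact Or.inl hnil
    · right
      have := h1.2 (by simpa using hnil)
      rwa [PySem.List.pyGet?_neg_one] at this
  have hdtt' : dW ((tubes[t]'ht) ++ List.replicate (runLen c (tubes[s]'hs).reverse) c)
      = dW (tubes[t]'ht) := by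
    rcases htt_cases with hnil | hlast
    · rw [hnil]
      simp only [List.nil_append]
      have hLrep : topRun (List.replicate (runLen c (tubes[s]'hs).reverse) c)
          = runLen c (List.replicate (runLen c (tubes[s]'hs).reverse) c).reverse :=
        topRun_of_getLast (by
          conv_lhs => rw [show runLen c (tubes[s]'hs).reverse
            = (runLen c (tubes[s]'hs).reverse - 1) + 1 by omega]
          rw [List.replicate_succ', List.getLast?_concat])
      rw [dW, dW, hLrep, List.reverse_replicate, runLen_replicate]
      simp [topRun, runLen]
    · rw [dW, dW, topRun_append_replicate _ _ _ hr1]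
      have htopt : topRun (tubes[t]'ht) = runLen c (tubes[t]'ht).reverse :=
        topRun_of_getLast hlast
      have hle : runLen c (tubes[t]'ht).reverse ≤ (tubes[t]'ht).length := by
        simpa using runLen_le c (tubes[t]'ht).reverse
      rw [htopt]
      simp only [List.length_append, List.length_replicate]
      omega
  have hne' : neW ((tubes[t]'ht) ++ List.replicate (runLen c (tubes[s]'hs).reverse) c) = 1 := by
    rw [neW, if_neg]
    intro hnil
    have : ((tubes[t]'ht) ++ List.replicate (runLen c (tubes[s]'hs).reverse) c).length = 0 := by
      rw [hnil]; simp
    simp at this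
    omega
  have hnest : neW (tubes[s]'hs) = 1 := by rw [neW, if_neg hstne]
  rw [mu, mu, hlen]
  apply mu_math _ _ _ _ _ (by omega) (neW_sum_le tubes)
  by_cases hfull : runLen c (tubes[s]'hs).reverse = (tubes[s]'hs).length
  · have httne : (tubes[t]'ht) ≠ [] := by
      intro hnil
      have := h2 (by simpa using hnil)
      rw [hfull] at this
      exact this rfl
    right
    have hst' : (tubes[s]'hs).take ((tubes[s]'hs).length - runLen c (tubes[s]'hs).reverse)
        = [] := by
      rw [hfull]
      simp
    constructor
    · have hd0 : dW ((tubes[s]'hs).take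
          ((tubes[s]'hs).length - runLen c (tubes[s]'hs).reverse)) = 0 := by
        rw [hst']; rfl
      have hd0' : dW (tubes[s]'hs) = 0 := by omega
      omega
    · have hn0 : neW ((tubes[s]'hs).take
          ((tubes[s]'hs).length - runLen c (tubes[s]'hs).reverse)) = 0 := by
        rw [hst', neW, if_pos rfl]
      have hnt : neW (tubes[t]'ht) = 1 := by rw [neW, if_neg httne]
      omega
  · left
    have hlt : runLen c (tubes[s]'hs).reverse < (tubes[s]'hs).length := by omega
    have hlen' : ((tubes[s]'hs).take
        ((tubes[s]'hs).length - runLen c (tubes[s]'hs).reverse)).length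
        = (tubes[s]'hs).length - runLen c (tubes[s]'hs).reverse := by
      simp only [List.length_take]
      omega
    have hne2 : ((tubes[s]'hs).take
        ((tubes[s]'hs).length - runLen c (tubes[s]'hs).reverse)) ≠ [] := by
      intro hnil
      rw [hnil] at hlen'
      simp at hlen'
      omega
    have hdlt : dW ((tubes[s]'hs).take
        ((tubes[s]'hs).length - runLen c (tubes[s]'hs).reverse)) + 1 ≤ dW (tubes[s]'hs) := by
      have h1' := topRun_pos hne2
      rw [dW, hlen', hdst]
      omega
    have hnst' : neW ((tubes[s]'hs).take
        ((tubes[s]'hs).length - runLen c (tubes[s]'hs).reverse)) = 1 := by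
      rw [neW, if_neg hne2]
    have hnettle : neW (tubes[t]'ht) ≤ 1 := by unfold neW; split <;> omega
    constructor
    · omega
    · omega

theorem isSolvedA_eq_solvedB (state : List (List Int)) : isSolvedA state = solvedB state := by
  induction state with
  | nil => rfl
  | cons tube rest ih =>
    have hB : solvedB (tube :: rest)
        = ((tube.length == 0 || (decide (4 ≤ tube.length) && tube.all fun x => x == tube.headI))
            && solvedB rest) := by
      simp [solvedB]
    rw [hB]
    cases tube with
    | nil => simp [isSolvedA, ih]
    | cons c tl =>
      rw [isSolvedA]
      rw [if_pos (by simp)]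
      by_cases h4 : (c :: tl).length < 4
      · rw [if_pos h4]
        simp only [show decide (4 ≤ (c :: tl).length) = false by
          rw [decide_eq_false_iff_not]; omega]
        simp
      · rw [if_neg h4]
        by_cases hall : (c :: tl).all (fun oc => oc == c) = true
        · rw [if_pos hall, ih]
          have h8 : 4 ≤ (c :: tl).length := by omega
          simp [hall, h8]
          intro _
          simp only [List.length_cons] at h8
          omega
        · rw [if_neg hall]
          have hall' : (c :: tl).all (fun oc => oc == c) = false :=
            Bool.eq_false_iff.mpr hall
          have h8 : 4 ≤ (c :: tl).length := by omega
          simp [hall', h8]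

theorem makeMoveA_eq_applyB {tubes : List (List Int)} {mv : Int × (Int × Int) × Int}
    (h : mv ∈ goodMovesA tubes) :
    makeMoveA tubes mv.1 mv.2.1 mv.2.2 = applyB tubes mv := by
  obtain ⟨s, t, hs, ht, hst, hsrc, _, rfl⟩ := mem_goodMovesA h
  rw [topChunkA_eq_topB] at *
  have hstne : tubes[s]'hs ≠ [] := by
    intro hnil
    rw [goodSourceA, topChunkA_eq_topB, hnil] at hsrc
    simp [topB] at hsrc
  set st := tubes[s]'hs with hstdef
  obtain ⟨c, hc⟩ : ∃ c, st.getLast? = some c := ⟨st.getLast hstne, List.getLast?_eq_some_getLast hstne⟩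
  set r := runLen c st.reverse with hr
  have htop : topB st = (c, (r : Int)) := by rw [topB, hc]
  have hr1 : 1 ≤ r := runLen_reverse_pos hc
  have hrle : r ≤ st.length := by simpa using runLen_le c st.reverse
  have hrep : (st.drop (st.length - r)).reverse = List.replicate r c := by
    rw [← List.take_reverse, hr]
    exact take_runLen c st.reverse
  simp only [makeMoveA, applyB, htop]
  rw [makeLoopA_spec r tubes s t hs ht (by omega) hrle]
  rw [show PySem.List.pyGetD tubes ((s : Nat) : Int) [] = st by
    rw [PySem.List.pyGetD_natCast, List.getD_eq_getElem _ _ hs]]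
  rw [show PySem.List.pyGetD tubes ((t : Nat) : Int) [] = tubes[t]'ht by
    rw [PySem.List.pyGetD_natCast, List.getD_eq_getElem _ _ ht]]
  rw [PySem.List.slice_to_neg_natCast st r (by omega)]
  simp only [PySem.List.pySetD_natCast, Int.toNat_natCast]
  rw [hrep]

theorem movesB_eq (tubes : List (List Int)) : movesB tubes = goodMovesA tubes := by
  unfold movesB goodMovesA
  rw [PySem.List.enumerate_eq_map_pyRange tubes ([] : List Int), PySem.List.len_eq,
    PySem.List.pyRange_zero_natCast, List.map_map, List.flatMap_map]
  apply List.flatMap_congr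
  intro s hsmem
  have hs : s < tubes.length := List.mem_range.mp hsmem
  simp only [Function.comp, PySem.List.pyGetD_natCast]
  have hst : tubes.getD s [] = tubes[s] := List.getD_eq_getElem _ _ hs
  rw [hst]
  have hsrc : goodSourceA tubes[s] = ((topB tubes[s]).2 != 0) := by
    rw [goodSourceA, topChunkA_eq_topB]
  by_cases hz : (topB tubes[s]).2 = 0
  · rw [if_pos hz, if_pos (by simp [hsrc, hz])]
  · rw [if_neg hz, if_neg (by simp [hsrc, hz])]
    rw [List.filterMap_map, List.filterMap_eq_flatMap_toList]
    apply List.flatMap_congr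
    intro t htmem
    have ht : t < tubes.length := List.mem_range.mp htmem
    simp only [Function.comp, PySem.List.pyGetD_natCast]
    have htt : tubes.getD t [] = tubes[t] := List.getD_eq_getElem _ _ ht
    rw [htt]
    have hgm : goodMoveA tubes[s] tubes[t]
        = (if (topB tubes[s]).2 = 0 ∨ (tubes[t].length ≠ 0 ∧ tubes[t].getLast? ≠ some (topB tubes[s]).1) then false
           else if tubes[t].length = 0 ∧ (tubes[s].length : Int) = (topB tubes[s]).2 then false
           else decide ((topB tubes[s]).2 + (tubes[t].length : Int) ≤ 4)) := by
      rw [goodMoveA]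
      simp only [topChunkA_eq_topB, PySem.List.pyGet?_neg_one]
    by_cases hts : t = s
    · subst hts
      simp
    · rw [if_neg hts, if_neg (show ¬((t : Nat) : Int) = ((s : Nat) : Int) from
        fun h => hts (by exact_mod_cast h)), hgm]
      by_cases h4 : 4 < (topB tubes[s]).2 + (tubes[t].length : Int)
      · have hC : ¬ ((topB tubes[s]).2 + (tubes[t].length : Int) ≤ 4) := by omega
        rw [if_pos h4]
        simp [hC, ite_self]
      · have hC : (topB tubes[s]).2 + (tubes[t].length : Int) ≤ 4 := by omega
        rw [if_neg h4]
        by_cases hL : tubes[t] = []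
        · have hC0 : (topB tubes[s]).2 ≤ 4 := by simpa [hL] using hC
          by_cases hE : (tubes[s].length : Int) = (topB tubes[s]).2
          · simp [hL, hE, hz, topChunkA_eq_topB]
          · simp [hL, hE, hz, hC0, topChunkA_eq_topB]
        · by_cases hlast : tubes[t].getLast? = some (topB tubes[s]).1
          · simp [hL, hlast, hz, hC, topChunkA_eq_topB]
          · simp [hL, hlast, hz, topChunkA_eq_topB]

-- one DFS step: the move solves the puzzle at once, or the resulting state is solvable
def stepT (state : List (List Int)) (mv : Int × (Int × Int) × Int) : Bool :=
  isSolvedA (makeMoveA state mv.1 mv.2.1 mv.2.2) || help_solve (makeMoveA state mv.1 mv.2.1 mv.2.2) []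

theorem mu_lt_fuelA (tubes : List (List Int)) :
    mu tubes < ((tubes.map List.length).sum + 1) * (tubes.length + 1) := by
  have hdw : (tubes.map dW).sum ≤ (tubes.map List.length).sum := by
    induction tubes with
    | nil => simp
    | cons y ys ih =>
      have : dW y ≤ y.length := Nat.sub_le _ _
      simp only [List.map_cons, List.sum_cons]
      omega
  have hne := neW_sum_le tubes
  have hmul : (tubes.map dW).sum * (tubes.length + 1)
      ≤ (tubes.map List.length).sum * (tubes.length + 1) :=
    Nat.mul_le_mul_right _ hdw
  rw [mu]
  have : ((tubes.map List.length).sum + 1) * (tubes.length + 1)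
      = (tubes.map List.length).sum * (tubes.length + 1) + tubes.length + 1 := by ring
  omega

theorem helpA_any : ∀ (N : Nat) (state : List (List Int)), mu state < N →
    ∀ (f : Nat), mu state < f →
    ∀ (m : List ((Int × (Int × Int) × Int) × List (List Int))),
      helpA f state m = (goodMovesA state).any (stepT state) := by
  intro N
  induction N with
  | zero => intro state h; omega
  | succ N ih =>
    intro state hN f hf m
    cases f with
    | zero => omega
    | succ f =>
      simp only [helpA]
      have inner : ∀ ms, (∀ mv ∈ ms, mv ∈ goodMovesA state) →
          goA f state m ms = ms.any (stepT state) := by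
        intro ms
        induction ms with
        | nil => intro _; simp only [goA]; rfl
        | cons mv rest ihms =>
          intro hms
          have hmA : mv ∈ goodMovesA state := hms mv List.mem_cons_self
          have hmu' : mu (makeMoveA state mv.1 mv.2.1 mv.2.2) < mu state := mu_decreaseA hmA
          simp only [goA, List.any_cons]
          by_cases hsol : isSolvedA (makeMoveA state mv.1 mv.2.1 mv.2.2) = true
          · rw [if_pos hsol]
            simp [stepT, hsol]
          · rw [if_neg hsol]
            have hsame : helpA f (makeMoveA state mv.1 mv.2.1 mv.2.2)
                  (m ++ [(mv, copyTubesA (makeMoveA state mv.1 mv.2.1 mv.2.2))])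
                = help_solve (makeMoveA state mv.1 mv.2.1 mv.2.2) [] := by
              rw [help_solve,
                ih _ (by omega) f (by omega) _,
                ih _ (by omega) _ (mu_lt_fuelA _) _]
            by_cases hrek : helpA f (makeMoveA state mv.1 mv.2.1 mv.2.2)
                (m ++ [(mv, copyTubesA (makeMoveA state mv.1 mv.2.1 mv.2.2))]) = true
            · rw [if_pos hrek]
              rw [hsame] at hrek
              simp [stepT, hrek]
            · rw [if_neg hrek]
              rw [hsame] at hrek
              have hstep : stepT state mv = false := by
                rw [stepT, Bool.eq_false_iff.mpr hsol, Bool.eq_false_iff.mpr hrek]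
                rfl
              rw [ihms (fun x hx => hms x (List.mem_cons_of_mem _ hx)), hstep]
              simp
      exact inner (goodMovesA state) (fun _ h => h)

theorem help_solve_any (state : List (List Int)) (m : List ((Int × (Int × Int) × Int) × List (List Int))) :
    help_solve state m = (goodMovesA state).any (stepT state) := by
  rw [help_solve, helpA_any (mu state + 1) state (by omega) _ (mu_lt_fuelA state) m]

theorem dfs_fold_true (fuel : Nat) (state : List (List Int))
    (d : PySem.Set (List (List Int))) (ms : List (Int × (Int × Int) × Int)) :
    ms.foldl (fun acc mv =>
      if acc.1 then acc
      else
        let ns := applyB state mv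
        if solvedB ns then (true, acc.2) else dfsB fuel ns acc.2) (true, d) = (true, d) := by
  induction ms with
  | nil => rfl
  | cons mv rest ih => simpa using ih

theorem dfsB_correct : ∀ (fuel : Nat) (state : List (List Int)), mu state < fuel →
    ∀ (dead : PySem.Set (List (List Int))), (∀ st ∈ dead, help_solve st [] = false) →
      (∀ st ∈ (dfsB fuel state dead).2, help_solve st [] = false) ∧
      (dfsB fuel state dead).1 = help_solve state [] := by
  intro fuel
  induction fuel with
  | zero => intro state h; omega
  | succ fuel ih =>
    intro state hmu dead hdead
    rw [dfsB]
    by_cases hc : PySem.Set.contains dead state = true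
    · rw [if_pos hc]
      have hmem : state ∈ dead := by simpa [PySem.Set.contains] using hc
      exact ⟨hdead, by simp [hdead state hmem]⟩
    · rw [if_neg hc]
      have aux : ∀ (ms : List (Int × (Int × Int) × Int)), (∀ mv ∈ ms, mv ∈ goodMovesA state) →
          ∀ d, (∀ st ∈ d, help_solve st [] = false) →
          (∀ st ∈ (ms.foldl (fun acc mv =>
              if acc.1 then acc
              else
                let ns := applyB state mv
                if solvedB ns then (true, acc.2) else dfsB fuel ns acc.2) (false, d)).2,
            help_solve st [] = false) ∧
          (ms.foldl (fun acc mv =>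
              if acc.1 then acc
              else
                let ns := applyB state mv
                if solvedB ns then (true, acc.2) else dfsB fuel ns acc.2) (false, d)).1
            = ms.any (stepT state) := by
        intro ms
        induction ms with
        | nil => intro _ d hd; exact ⟨hd, rfl⟩
        | cons mv rest ihms =>
          intro hms d hd
          have hmA : mv ∈ goodMovesA state := hms mv (List.mem_cons_self)
          have happly : applyB state mv = makeMoveA state mv.1 mv.2.1 mv.2.2 :=
            (makeMoveA_eq_applyB hmA).symm
          simp only [List.foldl_cons, List.any_cons, if_neg (by simp : ¬ (false = true))]
          by_cases hsol : solvedB (applyB state mv) = true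
          · rw [if_pos hsol, dfs_fold_true]
            have hstep : stepT state mv = true := by
              rw [stepT, ← happly, isSolvedA_eq_solvedB, hsol]
              simp
            exact ⟨hd, by simp [hstep]⟩
          · rw [if_neg hsol]
            have hmuns : mu (applyB state mv) < fuel := by
              have := mu_decreaseA hmA
              rw [happly]; omega
            have hsb := ih (applyB state mv) hmuns d hd
            rcases hpair : dfsB fuel (applyB state mv) d with ⟨b, d2⟩
            rw [hpair] at hsb
            cases b with
            | true =>
              rw [dfs_fold_true]
              have hstep : stepT state mv = true := by
                rw [stepT, ← happly]
                have : help_solve (applyB state mv) [] = true := hsb.2.symm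
                simp [this]
              exact ⟨hsb.1, by simp [hstep]⟩
            | false =>
              have hstep : stepT state mv = false := by
                rw [stepT, ← happly, isSolvedA_eq_solvedB, Bool.eq_false_iff.mpr hsol]
                have : help_solve (applyB state mv) [] = false := hsb.2.symm
                simp [this]
              have hres := ihms (fun x hx => hms x (List.mem_cons_of_mem _ hx)) d2 hsb.1
              exact ⟨hres.1, by rw [hres.2, hstep]; simp⟩
      have hfold := aux (movesB state) (by rw [movesB_eq]; exact fun mv h => h) dead hdead
      have hany : (movesB state).any (stepT state) = help_solve state [] := by
        rw [movesB_eq, ← help_solve_any state []]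
      rcases hF : ((movesB state).foldl (fun acc mv =>
          if acc.1 then acc
          else
            let ns := applyB state mv
            if solvedB ns then (true, acc.2) else dfsB fuel ns acc.2) (false, dead)) with ⟨b, d2⟩
      rw [hF] at hfold
      rw [hF]
      cases b with
      | true =>
        have hred : (if ((true, d2) : Bool × PySem.Set (List (List Int))).1 = true
            then ((true, d2) : Bool × PySem.Set (List (List Int)))
            else (false, PySem.Set.add (true, d2).2 state)) = (true, d2) := by simp
        rw [hred]
        exact ⟨hfold.1, by rw [← hany, ← hfold.2]⟩
      | false =>
        have hred : (if ((false, d2) : Bool × PySem.Set (List (List Int))).1 = true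
            then ((false, d2) : Bool × PySem.Set (List (List Int)))
            else (false, PySem.Set.add (false, d2).2 state)) = (false, PySem.Set.add d2 state) := by simp
        rw [hred]
        constructor
        · intro st hst
          rw [PySem.Set.mem_add] at hst
          rcases hst with h | h
          · exact hfold.1 st h
          · subst h
            rw [← hany, ← hfold.2]
        · rw [← hany, ← hfold.2]

theorem mu_lt_fuel (tubes : List (List Int)) :
    mu tubes < (tubes.map List.length).sum * (tubes.length + 1) + tubes.length + 1 := by
  have hdw : (tubes.map dW).sum ≤ (tubes.map List.length).sum := by
    induction tubes with
    | nil => simp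
    | cons y ys ih =>
      have : dW y ≤ y.length := Nat.sub_le _ _
      simp only [List.map_cons, List.sum_cons]
      omega
  have hne := neW_sum_le tubes
  have hmul : (tubes.map dW).sum * (tubes.length + 1)
      ≤ (tubes.map List.length).sum * (tubes.length + 1) :=
    Nat.mul_le_mul_right _ hdw
  rw [mu]
  omega

-- ===== VERDICT (by name: the statement is the Claim_ definition above) =====
theorem help_solve_spec : Claim_equal_help_solve := by
  intro tubes moves _
  unfold Spec_help_solve help_solve_alt
  have h := (dfsB_correct _ tubes (mu_lt_fuel tubes) PySem.Set.empty
    (by intro st hst; cases hst)).2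
  rw [help_solve_any tubes moves, ← help_solve_any tubes [], h]
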